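-- pv_equiv track=rewrite | github.com/karankaushik95/COMP9021 | quiz5.py | replace1_by_star
-- ===== SOURCE A (Python) =====
-- dim = 10
--
-- def replace1_by_star(i,j,grid, count, start):
--     if grid[i][j] == start:
--         grid[i][j] = '*'
--         count +=1
--         if i!=0:
--             count = replace1_by_star(i-1, j, grid, count, start)
--         if i <dim -1:
--             count = replace1_by_star(i+1, j, grid, count, start)
--         if j!=0:
--             count = replace1_by_star(i, j-1, grid, count, start)
--         if j<dim - 1:
--             count = replace1_by_star(i, j+1, grid, count, start)
--     return count
-- ===== SOURCE B (Python) =====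
-- dim = 10
--
-- def replace1_by_star(i, j, grid, count, start):
--     # Iterative flood fill with an explicit stack instead of recursion.
--     # Pushes neighbours in reverse order so cells are visited in the same
--     # order as the recursive version (up, down, left, right).
--     stack = [(i, j)]
--     while stack:
--         r, c = stack.pop()
--         if grid[r][c] == start:
--             grid[r][c] = '*'
--             count += 1
--             if c < dim - 1:
--                 stack.append((r, c + 1))
--             if c != 0:
--                 stack.append((r, c - 1))
--             if r < dim - 1:
--                 stack.append((r + 1, c))
--             if r != 0:
--                 stack.append((r - 1, c))
--     return count
-- ===== Notes on version B (the rewrite author's own statement) =====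
-- stated objective: alternative
-- what changed: The recursive four-way flood fill is replaced by an iterative loop over an explicit stack that pops a cell, re-tests it against start, marks and counts it, and pushes its in-bounds neighbours (in reverse order, so cells are visited in the recursive order), avoiding Python recursion entirely.
-- outside the precondition, e.g. on replace1_by_star(0, 0, [['a', 'b'], ['c', 'd']], 0, 'a'): A returns 1, B returns 1; on replace1_by_star(-1, 0, [['x', 'y'], ['a', 'b']], 0, 'a'): A returns 1, B returns 1
import Mathlib
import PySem

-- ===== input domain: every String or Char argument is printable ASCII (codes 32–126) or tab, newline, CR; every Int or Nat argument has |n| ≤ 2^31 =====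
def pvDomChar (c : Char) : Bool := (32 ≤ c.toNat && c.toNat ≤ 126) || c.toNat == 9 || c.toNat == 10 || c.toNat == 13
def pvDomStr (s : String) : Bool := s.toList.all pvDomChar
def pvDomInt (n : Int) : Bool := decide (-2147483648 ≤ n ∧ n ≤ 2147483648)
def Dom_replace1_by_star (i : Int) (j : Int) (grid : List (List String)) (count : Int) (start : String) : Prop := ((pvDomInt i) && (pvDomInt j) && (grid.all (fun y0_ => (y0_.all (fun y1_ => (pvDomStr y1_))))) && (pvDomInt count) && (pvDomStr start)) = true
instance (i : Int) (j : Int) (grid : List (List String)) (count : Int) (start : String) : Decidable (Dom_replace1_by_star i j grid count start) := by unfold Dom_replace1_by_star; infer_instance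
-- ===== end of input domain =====

-- B replaces A's recursive flood fill by an iterative explicit-stack flood fill (same visit
-- order, no recursion); both Pythons mutate `grid` in place identically — the claim is about
-- the returned count.

-- Python's global `dim = 10`
def pvDim : Int := 10

-- grid[i][j] (Python semantics: a negative index wraps; none = IndexError)
def pvGet2 (grid : List (List String)) (i j : Int) : Option String :=
  match PySem.List.pyGet? grid i with
  | none => none
  | some row => PySem.List.pyGet? row j

-- grid[i][j] = v (Python semantics; where Python would raise IndexError — outside Pre_ —
-- the grid is returned unchanged)
def pvSet2 (grid : List (List String)) (i j : Int) (v : String) : List (List String) :=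
  match PySem.List.pyGet? grid i with
  | none => grid
  | some row =>
    match PySem.List.pySet? row j v with
    | none => grid
    | some row' => (PySem.List.pySet? grid i row').getD grid

-- number of cells equal to s; used only as a fuel bound making both ports total (Python A
-- recurses forever when start = '*' and the start cell matches; those inputs are outside Pre_)
def pvCount (grid : List (List String)) (s : String) : Nat :=
  (grid.map (fun row => row.count s)).sum

-- ===== PORT A =====
-- literal transliteration of A's recursion; the fuel only makes it total (inside Pre_ the
-- recursion depth is at most pvCount + 1, so the fuel never runs out there)
def pvArec : Nat → Int → Int → List (List String) → Int → String → Int × List (List String)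
  | 0, _, _, g, c, _ => (c, g)
  | Nat.succ f, i, j, g, c, s =>
    match pvGet2 g i j with
    | none => (c, g)  -- Python raises IndexError here (outside Pre_)
    | some v =>
      if v = s then
        let g1 := pvSet2 g i j "*"
        let c1 := c + 1
        let r1 := if i ≠ 0 then pvArec f (i - 1) j g1 c1 s else (c1, g1)
        let r2 := if i < pvDim - 1 then pvArec f (i + 1) j r1.2 r1.1 s else r1
        let r3 := if j ≠ 0 then pvArec f i (j - 1) r2.2 r2.1 s else r2
        let r4 := if j < pvDim - 1 then pvArec f i (j + 1) r3.2 r3.1 s else r3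
        r4
      else (c, g)

def replace1_by_star (i : Int) (j : Int) (grid : List (List String)) (count : Int) (start : String) : Int :=
  (pvArec (pvCount grid start + 1) i j grid count start).1

-- ===== PORT B =====
-- literal transliteration of B's while-loop; the Lean list is the stack, head = top (B pushes
-- the four neighbours in reverse order, so the popped order is up, down, left, right); the
-- fuel only makes the loop total (inside Pre_ at most 4*pvCount + 1 iterations happen)
def pvLoop : Nat → List (Int × Int) → List (List String) → Int → String → Int × List (List String)
  | 0, _, g, c, _ => (c, g)
  | Nat.succ _, [], g, c, _ => (c, g)
  | Nat.succ f, (r, cl) :: stack, g, c, s =>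
    match pvGet2 g r cl with
    | none => pvLoop f stack g c s  -- Python raises IndexError here (outside Pre_)
    | some v =>
      if v = s then
        pvLoop f
          ((if r ≠ 0 then [(r - 1, cl)] else []) ++
           (if r < pvDim - 1 then [(r + 1, cl)] else []) ++
           (if cl ≠ 0 then [(r, cl - 1)] else []) ++
           (if cl < pvDim - 1 then [(r, cl + 1)] else []) ++ stack)
          (pvSet2 g r cl "*") (c + 1) s
      else pvLoop f stack g c s

def replace1_by_star_alt (i : Int) (j : Int) (grid : List (List String)) (count : Int) (start : String) : Int :=
  (pvLoop (4 * pvCount grid start + 2) [(i, j)] grid count start).1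

-- ===== PRECONDITION & SPEC =====
-- Pre_ excludes exactly three kinds of inputs: those where the very first lookup grid[i][j]
-- raises IndexError; those whose start cell matches but start = '*' (A then recurses forever);
-- and matching start cells where the fixed dim = 10 guards can step outside the grid (fewer
-- than 10 rows, a row among the first 10 shorter than 10, or a start index outside 0..9, where
-- Python's negative-index wraparound makes the guards disagree with the grid) — there A raises
-- IndexError on some inputs, though on some others it still returns (see the cites).
def Pre_replace1_by_star (i : Int) (j : Int) (grid : List (List String)) (count : Int) (start : String) : Prop :=
  (pvGet2 grid i j ≠ none ∧ pvGet2 grid i j ≠ some start) ∨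
  (10 ≤ grid.length ∧ (∀ row ∈ grid.take 10, 10 ≤ row.length) ∧
   0 ≤ i ∧ i < 10 ∧ 0 ≤ j ∧ j < 10 ∧ start ≠ "*")
instance (i : Int) (j : Int) (grid : List (List String)) (count : Int) (start : String) : Decidable (Pre_replace1_by_star i j grid count start) := by unfold Pre_replace1_by_star; infer_instance

def pvWitness_replace1_by_star : Int × Int × List (List String) × Int × String := (0, 0, [["x"]], 0, "y")

def Spec_replace1_by_star (i : Int) (j : Int) (grid : List (List String)) (count : Int) (start : String) (out : Int) : Prop := out = replace1_by_star_alt i j grid count start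
instance (i : Int) (j : Int) (grid : List (List String)) (count : Int) (start : String) (out : Int) : Decidable (Spec_replace1_by_star i j grid count start out) := by unfold Spec_replace1_by_star; infer_instance

-- ===== CLAIM (what is proved, stated in full; the proofs are below) =====
def Claim_equal_replace1_by_star : Prop := ∀ (i : Int) (j : Int) (grid : List (List String)) (count : Int) (start : String), Dom_replace1_by_star i j grid count start → Pre_replace1_by_star i j grid count start → Spec_replace1_by_star i j grid count start (replace1_by_star i j grid count start)

-- ===== LEMMAS AND PROOFS =====

-- a successful Python lookup resolves to one Nat index, and pySet? at the same Int index sets it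
theorem pvIdx_of_pyGet?_eq_some {α : Type} {xs : List α} {i : Int} {x : α}
    (h : PySem.List.pyGet? xs i = some x) :
    ∃ n : Nat, n < xs.length ∧ xs[n]? = some x ∧
      ∀ v : α, PySem.List.pySet? xs i v = some (xs.set n v) := by
  unfold PySem.List.pyGet? at h
  unfold PySem.List.pySet? PySem.List.pyIdx? at *
  split_ifs at h with h1 h2 h3
  · simp only [Option.bind_some] at h
    exact ⟨i.toNat, (List.getElem?_eq_some_iff.1 h).1, h, fun v => by simp [h1, h2]⟩
  · simp at h
  · exact ⟨xs.length - (-i).toNat, (List.getElem?_eq_some_iff.1 h).1, h, fun v => by simp [h1, h3]⟩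
  · simp at h

theorem pvSum_set {l : List Nat} {n : Nat} (h : n < l.length) (a : Nat) :
    (l.set n a).sum + l[n] = l.sum + a := by
  conv_rhs => rw [← List.set_getElem_self h]
  rw [List.set_eq_take_cons_drop a h, List.set_eq_take_cons_drop l[n] h]
  simp only [List.sum_append, List.sum_cons]
  omega

theorem pvCount_set {row : List String} {m : Nat} {s : String} (h : m < row.length)
    (hm : row[m]? = some s) (hs : s ≠ "*") :
    (row.set m "*").count s + 1 = row.count s := by
  have hm' : row[m] = s := (List.getElem?_eq_some_iff.1 hm).2
  conv_rhs => rw [← List.set_getElem_self h]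
  rw [List.set_eq_take_cons_drop "*" h, List.set_eq_take_cons_drop row[m] h]
  simp only [List.count_append, List.count_cons, hm']
  simp [Ne.symm hs]
  omega

-- marking a cell that holds s with '*' removes exactly one s-cell
theorem pvCount_set2 {g : List (List String)} {i j : Int} {s : String}
    (h : pvGet2 g i j = some s) (hs : s ≠ "*") :
    pvCount (pvSet2 g i j "*") s + 1 = pvCount g s := by
  unfold pvGet2 pvSet2 at *
  rcases hrow : PySem.List.pyGet? g i with _ | row
  · rw [hrow] at h; simp at h
  · rw [hrow] at h
    dsimp only at h ⊢
    obtain ⟨n, hn, hgn, hsetg⟩ := pvIdx_of_pyGet?_eq_some hrow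
    obtain ⟨m, hm, hrm, hsetr⟩ := pvIdx_of_pyGet?_eq_some h
    rw [hsetr "*"]
    dsimp only
    rw [hsetg (row.set m "*")]
    simp only [Option.getD_some]
    have hrow_n : g[n] = row := (List.getElem?_eq_some_iff.1 hgn).2
    unfold pvCount
    rw [List.map_set]
    have := pvSum_set (l := g.map (fun row => row.count s)) (n := n)
      (by simpa using hn) ((row.set m "*").count s)
    have hgetmap : (g.map (fun row => row.count s))[n]'(by simpa using hn) = row.count s := by
      simp [hrow_n]
    rw [hgetmap] at this
    have hc := pvCount_set hm hrm hs
    omega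

-- A's recursion never increases the number of s-cells
theorem pvCount_Arec_le {s : String} (hs : s ≠ "*") :
    ∀ (f : Nat) (i j : Int) (g : List (List String)) (c : Int),
      pvCount (pvArec f i j g c s).2 s ≤ pvCount g s := by
  intro f
  induction f with
  | zero => intro i j g c; simp [pvArec]
  | succ f IH =>
    intro i j g c
    simp only [pvArec]
    cases hv : pvGet2 g i j with
    | none => simp
    | some v =>
      dsimp only
      by_cases hvs : v = s
      · rw [if_pos hvs]
        rw [hvs] at hv
        have h1 : pvCount (pvSet2 g i j "*") s + 1 = pvCount g s := pvCount_set2 hv hs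
        have e1 : pvCount (if i ≠ 0 then pvArec f (i - 1) j (pvSet2 g i j "*") (c + 1) s else (c + 1, pvSet2 g i j "*")).2 s ≤ pvCount (pvSet2 g i j "*") s := by
          split
          · exact IH _ _ _ _
          · exact le_rfl
        generalize (if i ≠ 0 then pvArec f (i - 1) j (pvSet2 g i j "*") (c + 1) s else (c + 1, pvSet2 g i j "*")) = r1 at e1 ⊢
        have e2 : pvCount (if i < pvDim - 1 then pvArec f (i + 1) j r1.2 r1.1 s else r1).2 s ≤ pvCount r1.2 s := by
          split
          · exact IH _ _ _ _
          · exact le_rfl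
        generalize (if i < pvDim - 1 then pvArec f (i + 1) j r1.2 r1.1 s else r1) = r2 at e2 ⊢
        have e3 : pvCount (if j ≠ 0 then pvArec f i (j - 1) r2.2 r2.1 s else r2).2 s ≤ pvCount r2.2 s := by
          split
          · exact IH _ _ _ _
          · exact le_rfl
        generalize (if j ≠ 0 then pvArec f i (j - 1) r2.2 r2.1 s else r2) = r3 at e3 ⊢
        have e4 : pvCount (if j < pvDim - 1 then pvArec f i (j + 1) r3.2 r3.1 s else r3).2 s ≤ pvCount r3.2 s := by
          split
          · exact IH _ _ _ _
          · exact le_rfl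
        generalize (if j < pvDim - 1 then pvArec f i (j + 1) r3.2 r3.1 s else r3) = r4 at e4 ⊢
        omega
      · simp [hvs]

-- the loop's value does not depend on the fuel once it exceeds 4*pvCount + |stack|
theorem pvLoop_stable {s : String} (hs : s ≠ "*") :
    ∀ (n f f' : Nat) (S : List (Int × Int)) (g : List (List String)) (c : Int),
      4 * pvCount g s + S.length ≤ n →
      4 * pvCount g s + S.length < f → 4 * pvCount g s + S.length < f' →
      pvLoop f S g c s = pvLoop f' S g c s := by
  intro n
  induction n with
  | zero =>
    intro f f' S g c h0 hf hf'
    have hS : S = [] := by cases S with | nil => rfl | cons p S => simp at h0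
    subst hS
    cases f with
    | zero => omega
    | succ f => cases f' with
      | zero => omega
      | succ f' => simp [pvLoop]
  | succ n IH =>
    intro f f' S g c hn hf hf'
    cases S with
    | nil =>
      cases f with
      | zero => omega
      | succ f => cases f' with
        | zero => omega
        | succ f' => simp [pvLoop]
    | cons p S =>
      obtain ⟨r, cl⟩ := p
      cases f with
      | zero => omega
      | succ f =>
      cases f' with
      | zero => omega
      | succ f' =>
      simp only [pvLoop]
      simp only [List.length_cons] at hn hf hf'
      cases hv : pvGet2 g r cl with
      | none =>
        dsimp only
        exact IH f f' S g c (by omega) (by omega) (by omega)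
      | some v =>
        dsimp only
        by_cases hvs : v = s
        · rw [if_pos hvs, if_pos hvs]
          rw [hvs] at hv
          have h1 : pvCount (pvSet2 g r cl "*") s + 1 = pvCount g s := pvCount_set2 hv hs
          have hlen : ((if r ≠ 0 then [(r - 1, cl)] else []) ++
              (if r < pvDim - 1 then [(r + 1, cl)] else []) ++
              (if cl ≠ 0 then [(r, cl - 1)] else []) ++
              (if cl < pvDim - 1 then [(r, cl + 1)] else []) ++ S).length ≤ 4 + S.length := by
            simp only [List.length_append]
            split_ifs <;> simp
          apply IH
          · omega
          · omega
          · omega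
        · rw [if_neg hvs, if_neg hvs]
          exact IH f f' S g c (by omega) (by omega) (by omega)

-- simulation: popping (i, j) and continuing the loop = running A's recursion at (i, j),
-- then continuing the loop with the rest of the stack
theorem pvSim {s : String} (hs : s ≠ "*") :
    ∀ (n : Nat) (i j : Int) (g : List (List String)) (c : Int)
      (S : List (Int × Int)) (fa fl fl' : Nat),
      pvCount g s ≤ n → pvCount g s < fa →
      4 * pvCount g s + S.length + 1 < fl →
      4 * pvCount (pvArec fa i j g c s).2 s + S.length < fl' →
      pvLoop fl ((i, j) :: S) g c s
        = pvLoop fl' S (pvArec fa i j g c s).2 (pvArec fa i j g c s).1 s := by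
  intro n
  induction n using Nat.strong_induction_on with
  | _ n IH =>
  intro i j g c S fa fl fl' hn hfa hfl hfl'
  cases fa with
  | zero => omega
  | succ fa =>
  cases fl with
  | zero => omega
  | succ fl =>
  simp only [pvArec, pvLoop] at hfl' ⊢
  cases hv : pvGet2 g i j with
  | none =>
    rw [hv] at hfl'
    dsimp only at hfl' ⊢
    exact pvLoop_stable hs (4 * pvCount g s + S.length) fl fl' S g c le_rfl (by omega) (by omega)
  | some v =>
    rw [hv] at hfl'
    dsimp only at hfl' ⊢
    by_cases hvs : v = s
    · simp only [if_pos hvs] at hfl' ⊢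
      simp only [List.append_assoc]
      rw [hvs] at hv
      have h1 : pvCount (pvSet2 g i j "*") s + 1 = pvCount g s := pvCount_set2 hv hs
      have hcs1 : pvCount (pvSet2 g i j "*") s < n := by omega
      -- one neighbour step: pop the optional pushed cell = run the corresponding guarded recursion
      have step : ∀ (P : Prop) (inst : Decidable P) (i' j' : Int) (g' : List (List String))
          (c' : Int) (S' : List (Int × Int)) (f : Nat),
          pvCount g' s < n → pvCount g' s < fa →
          4 * pvCount g' s + S'.length + 1 < f →
          pvLoop f ((@ite _ P inst ([(i', j')]) ([])) ++ S') g' c' s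
            = pvLoop f S' (@ite _ P inst (pvArec fa i' j' g' c' s) (c', g')).2
                (@ite _ P inst (pvArec fa i' j' g' c' s) (c', g')).1 s := by
        intro P inst i' j' g' c' S' f hn' hfa' hf
        rcases inst with hP | hP
        · simp only [if_neg hP, List.nil_append]
        · simp only [if_pos hP, List.singleton_append]
          exact IH (pvCount g' s) hn' i' j' g' c' S' fa f f le_rfl hfa' hf
            (by have := pvCount_Arec_le hs fa i' j' g' c'; omega)
      -- lengths of the four optional pushes
      have hO2 : (if i < pvDim - 1 then [(i + 1, j)] else ([] : List (Int × Int))).length ≤ 1 := by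
        split <;> simp
      have hO3 : (if j ≠ 0 then [(i, j - 1)] else ([] : List (Int × Int))).length ≤ 1 := by
        split <;> simp
      have hO4 : (if j < pvDim - 1 then [(i, j + 1)] else ([] : List (Int × Int))).length ≤ 1 := by
        split <;> simp
      rw [step (i ≠ 0) _ (i - 1) j (pvSet2 g i j "*") (c + 1) _ fl hcs1 (by omega)
        (by simp only [List.length_append]; omega)]
      have e1 : pvCount (if i ≠ 0 then pvArec fa (i - 1) j (pvSet2 g i j "*") (c + 1) s
          else (c + 1, pvSet2 g i j "*")).2 s ≤ pvCount (pvSet2 g i j "*") s := by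
        split
        · exact pvCount_Arec_le hs _ _ _ _ _
        · exact le_rfl
      generalize (if i ≠ 0 then pvArec fa (i - 1) j (pvSet2 g i j "*") (c + 1) s
          else (c + 1, pvSet2 g i j "*")) = r1 at e1 hfl' ⊢
      rw [step (i < pvDim - 1) _ (i + 1) j r1.2 r1.1 _ fl (by omega) (by omega)
        (by simp only [List.length_append]; omega)]
      have e2 : pvCount (if i < pvDim - 1 then pvArec fa (i + 1) j r1.2 r1.1 s else r1).2 s
          ≤ pvCount r1.2 s := by
        split
        · exact pvCount_Arec_le hs _ _ _ _ _
        · exact le_rfl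
      generalize (if i < pvDim - 1 then pvArec fa (i + 1) j r1.2 r1.1 s else r1) = r2 at e2 hfl' ⊢
      rw [step (j ≠ 0) _ i (j - 1) r2.2 r2.1 _ fl (by omega) (by omega)
        (by simp only [List.length_append]; omega)]
      have e3 : pvCount (if j ≠ 0 then pvArec fa i (j - 1) r2.2 r2.1 s else r2).2 s
          ≤ pvCount r2.2 s := by
        split
        · exact pvCount_Arec_le hs _ _ _ _ _
        · exact le_rfl
      generalize (if j ≠ 0 then pvArec fa i (j - 1) r2.2 r2.1 s else r2) = r3 at e3 hfl' ⊢
      rw [step (j < pvDim - 1) _ i (j + 1) r3.2 r3.1 _ fl (by omega) (by omega) (by omega)]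
      have e4 : pvCount (if j < pvDim - 1 then pvArec fa i (j + 1) r3.2 r3.1 s else r3).2 s
          ≤ pvCount r3.2 s := by
        split
        · exact pvCount_Arec_le hs _ _ _ _ _
        · exact le_rfl
      generalize (if j < pvDim - 1 then pvArec fa i (j + 1) r3.2 r3.1 s else r3) = r4 at e4 hfl' ⊢
      exact pvLoop_stable hs (4 * pvCount r4.2 s + S.length) fl fl' S r4.2 r4.1 le_rfl
        (by omega) (by omega)
    · simp only [if_neg hvs] at hfl' ⊢
      exact pvLoop_stable hs (4 * pvCount g s + S.length) fl fl' S g c le_rfl (by omega) (by omega)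

theorem pvLoop_nil (f : Nat) (g : List (List String)) (c : Int) (s : String) :
    pvLoop (f + 1) [] g c s = (c, g) := rfl

-- ===== VERDICT (by name: the statement is the Claim_ definition above) =====
theorem replace1_by_star_spec : Claim_equal_replace1_by_star := by
  intro i j grid count start _hDom hPre
  unfold Spec_replace1_by_star replace1_by_star replace1_by_star_alt
  rcases hPre with ⟨hne, hnes⟩ | ⟨_, _, _, _, _, _, hs⟩
  · -- the start cell does not match: both sides return count at once
    cases hv : pvGet2 grid i j with
    | none => exact absurd hv hne
    | some v =>
      have hv' : v ≠ start := fun h => hnes (h ▸ hv)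
      simp only [pvArec, pvLoop, hv, if_neg hv']
  · -- start ≠ '*' : the stack loop simulates the recursion exactly
    have hsim := pvSim hs (pvCount grid start) i j grid count []
      (pvCount grid start + 1) (4 * pvCount grid start + 2) (4 * pvCount grid start + 1)
      le_rfl (by omega) (by simp) (by
        have := pvCount_Arec_le hs (pvCount grid start + 1) i j grid count
        simp only [List.length_nil]
        omega)
    rw [hsim, pvLoop_nil]
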